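-- pv_equiv track=rewrite | github.com/Azure/azure-rest-api-specs | analyze_tspconfig_with_suppressions.py | format_suppressions
-- ===== SOURCE A (Python) =====
-- from typing import Dict, List, Set
--
-- def format_suppressions(suppressions: Set[str]) -> str:
--     """Format suppressions as a compact string."""
--     if not suppressions:
--         return "None"
--
--     # Check for wildcard suppressions (ending with .*)
--     wildcards = [s for s in suppressions if s.endswith('.*')]
--
--     if wildcards:
--         return "ALL"
--
--     # Extract property names after the language tool name
--     # Format: options.@azure-tools/typespec-{lang}.{property}
--     # Extract everything after the last occurrence of typespec-{lang}.
--     props = []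
--     for s in suppressions:
--         # Find the position after "typespec-ts.", "typespec-python.", etc.
--         parts = s.split('.')
--         # Find where the typespec-{lang} part ends
--         for i, part in enumerate(parts):
--             if 'typespec-' in part and i + 1 < len(parts):
--                 # Join everything after typespec-{lang}
--                 prop = '.'.join(parts[i+1:])
--                 props.append(prop)
--                 break
--
--     return ", ".join(sorted(props)) if props else "Unknown"
-- ===== SOURCE B (Python) =====
-- def format_suppressions(suppressions):
--     """Format suppressions as a compact string (single pass, find-based extraction)."""
--     if not suppressions:
--         return "None"
--
--     props = []
--     for s in suppressions:
--         if s.endswith('.*'):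
--             return "ALL"
--         p = s.find('typespec-')
--         if p != -1:
--             d = s.find('.', p)
--             if d != -1:
--                 props.append(s[d + 1:])
--
--     return ", ".join(sorted(props)) if props else "Unknown"
-- ===== Notes on version B (the rewrite author's own statement) =====
-- stated objective: idiomatic
-- what changed: B makes a single pass that returns 'ALL' at the first wildcard instead of a separate filter pass, and extracts each property with two find calls (first 'typespec-' occurrence, then the next '.', slice the rest) instead of splitting on '.' and scanning the parts list with an index.
import Mathlib
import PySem

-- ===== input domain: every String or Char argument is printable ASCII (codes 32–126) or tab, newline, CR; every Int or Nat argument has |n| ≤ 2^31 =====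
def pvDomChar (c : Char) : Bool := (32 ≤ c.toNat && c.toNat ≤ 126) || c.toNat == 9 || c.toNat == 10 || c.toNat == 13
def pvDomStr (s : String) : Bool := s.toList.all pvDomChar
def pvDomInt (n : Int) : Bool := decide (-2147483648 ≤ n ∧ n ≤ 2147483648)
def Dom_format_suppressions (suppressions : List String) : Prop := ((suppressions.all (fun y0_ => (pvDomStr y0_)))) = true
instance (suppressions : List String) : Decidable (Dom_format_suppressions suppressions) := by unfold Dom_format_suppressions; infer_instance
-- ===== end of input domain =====

-- B replaces A's filter-for-wildcards pass and split-then-scan extraction by one pass with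
-- find-based extraction (first 'typespec-', then the following '.'); objective: more idiomatic.


-- ===== PORT A =====
-- inner 'for i, part in enumerate(parts): if ... : props.append(...); break'
def formatSuppressionsScanA (parts : List String) : List (Int × String) → Option String
  | [] => none
  | (i, part) :: rest =>
    if PySem.Str.isIn "typespec-" part && decide (i + 1 < (parts.length : Int)) then
      some (PySem.Str.join "." (PySem.List.slice parts (some (i + 1)) none))
    else formatSuppressionsScanA parts rest

def format_suppressions (suppressions : List String) : String :=
  if suppressions.isEmpty then "None"
  else
    let wildcards := suppressions.filter (fun s => PySem.Str.endswith s ".*")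
    if !wildcards.isEmpty then "ALL"
    else
      let props := suppressions.foldl (fun props s =>
        let parts := (PySem.Str.split? s ".").getD []
        match formatSuppressionsScanA parts (PySem.List.enumerate parts) with
        | some prop => props ++ [prop]
        | none => props) []
      if !props.isEmpty then PySem.Str.join ", " (PySem.List.sorted props (fun x => x) false)
      else "Unknown"

-- ===== PORT B =====
def formatSuppressionsLoopB : List String → List String → String
  | [], props =>
    if !props.isEmpty then PySem.Str.join ", " (PySem.List.sorted props (fun x => x) false)
    else "Unknown"
  | s :: rest, props =>
    if PySem.Str.endswith s ".*" then "ALL"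
    else
      let p := PySem.Str.find s "typespec-"
      if p ≠ -1 then
        let d := PySem.Str.findFrom s "." p
        if d ≠ -1 then formatSuppressionsLoopB rest (props ++ [PySem.Str.slice s (some (d + 1)) none])
        else formatSuppressionsLoopB rest props
      else formatSuppressionsLoopB rest props

def format_suppressions_alt (suppressions : List String) : String :=
  if suppressions.isEmpty then "None"
  else formatSuppressionsLoopB suppressions []

-- ===== PRECONDITION & SPEC =====
def Spec_format_suppressions (suppressions : List String) (out : String) : Prop := out = format_suppressions_alt suppressions
instance (suppressions : List String) (out : String) : Decidable (Spec_format_suppressions suppressions out) := by unfold Spec_format_suppressions; infer_instance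

-- ===== CLAIM (what is proved, stated in full; the proofs are below) =====
def Claim_equal_format_suppressions : Prop := ∀ (suppressions : List String), Dom_format_suppressions suppressions → Spec_format_suppressions suppressions (format_suppressions suppressions)

-- ===== LEMMAS AND PROOFS =====

-- B's per-string extraction, as a function (proof-only)
def extractB (s : String) : Option String :=
  let p := PySem.Str.find s "typespec-"
  if p ≠ -1 then
    let d := PySem.Str.findFrom s "." p
    if d ≠ -1 then some (PySem.Str.slice s (some (d + 1)) none) else none
  else none

-- A's per-string extraction, as a function (proof-only)
def extractA (s : String) : Option String :=
  let parts := (PySem.Str.split? s ".").getD []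
  formatSuppressionsScanA parts (PySem.List.enumerate parts)

def tySub : List Char := "typespec-".toList

-- chars-level versions
def cExtractB (cs : List Char) : Option (List Char) :=
  let p := PySem.Chars.find cs tySub
  if p = -1 then none
  else
    let r := PySem.Chars.find (cs.drop p.toNat) ['.']
    if r = -1 then none else some (cs.drop (p.toNat + r.toNat + 1))

def cScan : List (List Char) → Option (List Char)
  | [] => none
  | x :: rest =>
    if rest.isEmpty then none
    else if PySem.Chars.isIn tySub x then some (PySem.Chars.join ['.'] rest)
    else cScan rest

-- find points at k when k is the first prefix-occurrence
lemma find_eq_of {cs sub : List Char} {k : Nat} (h1 : sub <+: cs.drop k)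
    (h2 : ∀ i < k, ¬ sub <+: cs.drop i) : PySem.Chars.find cs sub = (k : Int) := by
  have hin : PySem.Chars.isIn sub cs = true :=
    (PySem.Chars.exists_prefix_drop_iff_isIn sub cs).mp ⟨k, h1⟩
  have h0 : 0 ≤ PySem.Chars.find cs sub :=
    (PySem.Chars.find_nonneg_iff cs sub).mpr ((PySem.Chars.isIn_iff_infix sub cs).mp hin)
  obtain ⟨hpre, hmin⟩ := PySem.Chars.find_spec h0
  rcases lt_trichotomy (PySem.Chars.find cs sub).toNat k with hlt | heq | hgt
  · exact absurd hpre (h2 _ hlt)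
  · omega
  · exact absurd h1 (hmin k hgt)

lemma drop_append_le (x ys : List Char) {i : Nat} (hi : i ≤ x.length) :
    (x ++ '.' :: ys).drop i = x.drop i ++ '.' :: ys := by
  rw [List.drop_append]
  have : i - x.length = 0 := by omega
  rw [this]
  simp

lemma infix_of_prefix_drop {sub x : List Char} {j : Nat} (h : sub <+: x.drop j) : sub <:+: x :=
  (PySem.Chars.isIn_iff_infix sub x).mp ((PySem.Chars.exists_prefix_drop_iff_isIn sub x).mp ⟨j, h⟩)

lemma join_cons (x y : List Char) (t : List (List Char)) :
    PySem.Chars.join ['.'] (x :: y :: t) = x ++ '.' :: PySem.Chars.join ['.'] (y :: t) := by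
  simp [PySem.Chars.join, List.intercalate, List.intersperse]

-- an occurrence starting at i ≤ x.length of a dot-free pattern lies inside x
lemma no_cross {sub x : List Char} (ys : List Char) (hsub : '.' ∉ sub) (_hx : '.' ∉ x)
    {i : Nat} (hi : i ≤ x.length) (h : sub <+: (x ++ '.' :: ys).drop i) : sub <+: x.drop i := by
  rw [drop_append_le x ys hi] at h
  by_cases hlen : i + sub.length ≤ x.length
  · have hsl : sub.length ≤ (x.drop i).length := by
      simp only [List.length_drop]; omega
    have := List.prefix_iff_eq_take.mp h
    rw [List.take_append_of_le_length hsl] at this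
    rw [this]
    exact List.take_prefix _ _
  · exfalso
    have hj : x.length - i < sub.length := by omega
    have hv := h.getElem hj
    have hdl : (x.drop i).length = x.length - i := by simp
    have h2 : (x.drop i ++ '.' :: ys)[x.length - i]'(by simp only [List.length_append, List.length_drop, List.length_cons]; omega) = '.' := by
      rw [List.getElem_append_right (by omega)]
      simp [hdl]
    exact hsub ((hv.trans h2) ▸ List.getElem_mem hj)

lemma drop_shift (x ys : List Char) {i : Nat} (h : x.length < i) :
    (x ++ '.' :: ys).drop i = ys.drop (i - x.length - 1) := by
  rw [List.drop_append]
  have h1 : x.drop i = [] := List.drop_eq_nil_of_le (by omega)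
  have h2 : i - x.length = (i - x.length - 1) + 1 := by omega
  rw [h1, h2]
  simp

-- first '.' in a ++ '.'::b with dot-free a is at a.length
lemma find_dot (a b : List Char) (ha : '.' ∉ a) :
    PySem.Chars.find (a ++ '.' :: b) ['.'] = (a.length : Int) := by
  apply find_eq_of
  · rw [List.drop_left]
    exact ⟨b, rfl⟩
  · intro i hi hpre
    have h0 : (0 : Nat) < (['.'] : List Char).length := by simp
    have hil : i < (a ++ '.' :: b).length := by simp; omega
    have hv := hpre.getElem h0
    have hb1 : ((a ++ '.' :: b).drop i)[0]'(by simp only [List.length_drop, List.length_append, List.length_cons]; omega) = (a ++ '.' :: b)[i + 0]'(by simp only [List.length_append, List.length_cons]; omega) :=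
      List.getElem_drop
    have hb2 : (a ++ '.' :: b)[i + 0]'(by simp only [List.length_append, List.length_cons]; omega) = a[i] := by
      rw [List.getElem_append_left (by omega)]
      simp
    have hfin : ('.' : Char) = a[i] := ((hv.trans hb1).trans hb2)
    exact ha (hfin ▸ List.getElem_mem hi)

lemma main_chars : ∀ parts : List (List Char), parts ≠ [] → (∀ x ∈ parts, '.' ∉ x) →
    cExtractB (PySem.Chars.join ['.'] parts) = cScan parts := by
  intro parts
  induction parts with
  | nil => intro h; exact absurd rfl h
  | cons x rest ih =>
    intro _ hfree
    have hx : '.' ∉ x := hfree x (List.mem_cons_self ..)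
    have hsubne : (tySub : List Char) ≠ [] := by decide
    have hsubdot : '.' ∉ (tySub : List Char) := by decide
    rcases rest with _ | ⟨y, t⟩
    · -- single part: no dot after any occurrence
      have hj : PySem.Chars.join ['.'] [x] = x := by simp [PySem.Chars.join, List.intercalate]
      rw [hj]
      show cExtractB x = cScan [x]
      have hscan : cScan [x] = none := by simp [cScan]
      rw [hscan]
      unfold cExtractB
      by_cases hp : PySem.Chars.find x tySub = -1
      · simp [hp]
      · have hr : PySem.Chars.find (x.drop (PySem.Chars.find x tySub).toNat) ['.'] = -1 := by
          rw [PySem.Chars.find_eq_neg_one_iff]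
          intro hinf
          exact hx (List.mem_of_mem_drop (List.singleton_sublist.mp hinf.sublist))
        simp [hp, hr]
    · -- at least two parts
      have hfree' : ∀ z ∈ y :: t, '.' ∉ z := fun z hz => hfree z (List.mem_cons_of_mem _ hz)
      set ys := PySem.Chars.join ['.'] (y :: t) with hys_def
      have hcs : PySem.Chars.join ['.'] (x :: y :: t) = x ++ '.' :: ys := join_cons x y t
      rw [hcs]
      by_cases hin : PySem.Chars.isIn tySub x = true
      · -- property found in the first part
        have hscan : cScan (x :: y :: t) = some ys := by
          simp [cScan, hin]
          rw [hys_def]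
        rw [hscan]
        have hq0 : 0 ≤ PySem.Chars.find x tySub :=
          (PySem.Chars.find_nonneg_iff x _).mpr ((PySem.Chars.isIn_iff_infix _ x).mp hin)
        obtain ⟨hpre, hmin⟩ := PySem.Chars.find_spec hq0
        set q := (PySem.Chars.find x tySub).toNat with hq_def
        have hqlt : q < x.length := by
          have h1 := hpre.length_le
          simp only [List.length_drop] at h1
          have h2 : 0 < (tySub : List Char).length := by decide
          omega
        have hfind : PySem.Chars.find (x ++ '.' :: ys) tySub = (q : Int) := by
          apply find_eq_of
          · rw [drop_append_le x ys (by omega)]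
            exact hpre.trans (List.prefix_append _ _)
          · intro i hilt hcontra
            exact hmin i hilt (no_cross ys hsubdot hx (by omega) hcontra)
        have hdrop : (x ++ '.' :: ys).drop q = x.drop q ++ '.' :: ys := drop_append_le x ys (by omega)
        have hxdrop : '.' ∉ x.drop q := fun hm => hx (List.mem_of_mem_drop hm)
        have hrfind : PySem.Chars.find ((x ++ '.' :: ys).drop q) ['.'] = ((x.drop q).length : Int) := by
          rw [hdrop]; exact find_dot _ _ hxdrop
        unfold cExtractB
        rw [hfind]
        have hqne : ((q : Int)) ≠ -1 := by omega
        simp only [hqne, if_false, Int.toNat_natCast]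
        rw [hrfind]
        have hlne : (((x.drop q).length : Int)) ≠ -1 := by omega
        simp only [hlne, if_false, Int.toNat_natCast]
        have hlen : q + (x.drop q).length + 1 = x.length + 1 := by
          simp only [List.length_drop]; omega
        rw [hlen, drop_shift x ys (by omega)]
        simp
      · -- first part has no occurrence
        have hninf : ¬ (tySub : List Char) <:+: x := by
          intro hc
          exact hin ((PySem.Chars.isIn_iff_infix _ x).mpr hc)
        have hscan : cScan (x :: y :: t) = cScan (y :: t) := by
          simp [cScan, hin]
        rw [hscan, ← ih (by simp) hfree']
        by_cases hysf : PySem.Chars.find ys tySub = -1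
        · have hfind : PySem.Chars.find (x ++ '.' :: ys) tySub = -1 := by
            rw [PySem.Chars.find_eq_neg_one_iff]
            intro hinf
            obtain ⟨j, hj⟩ :=
              (PySem.Chars.exists_prefix_drop_iff_isIn _ _).mpr ((PySem.Chars.isIn_iff_infix _ _).mpr hinf)
            by_cases hjx : j ≤ x.length
            · exact hninf (infix_of_prefix_drop (no_cross ys hsubdot hx hjx hj))
            · rw [drop_shift x ys (by omega)] at hj
              exact (PySem.Chars.find_eq_neg_one_iff ys _).mp hysf (infix_of_prefix_drop hj)
          unfold cExtractB
          rw [hfind, hysf]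
          simp
        · have hp0 : 0 ≤ PySem.Chars.find ys tySub := by
            have := PySem.Chars.neg_one_le_find ys tySub
            omega
          obtain ⟨hpre, hmin⟩ := PySem.Chars.find_spec hp0
          set p' := (PySem.Chars.find ys tySub).toNat with hp_def
          have hfind : PySem.Chars.find (x ++ '.' :: ys) tySub = ((x.length + 1 + p' : Nat) : Int) := by
            apply find_eq_of
            · rw [drop_shift x ys (by omega)]
              have : x.length + 1 + p' - x.length - 1 = p' := by omega
              rw [this]
              exact hpre
            · intro i hilt hcontra
              by_cases hix : i ≤ x.length
              · exact hninf (infix_of_prefix_drop (no_cross ys hsubdot hx hix hcontra))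
              · rw [drop_shift x ys (by omega)] at hcontra
                exact hmin (i - x.length - 1) (by omega) hcontra
          unfold cExtractB
          rw [hfind]
          have hkne : (((x.length + 1 + p' : Nat) : Int)) ≠ -1 := by omega
          have hyne : PySem.Chars.find ys tySub ≠ -1 := hysf
          simp only [hkne, hyne, if_false, Int.toNat_natCast]
          have hdropeq : (x ++ '.' :: ys).drop (x.length + 1 + p') = ys.drop p' := by
            rw [drop_shift x ys (by omega)]
            congr 1
            omega
          rw [hdropeq]
          simp only [← hp_def]
          by_cases hr : PySem.Chars.find (ys.drop p') ['.'] = -1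
          · simp [hr]
          · simp only [hr, if_false]
            congr 1
            rw [drop_shift x ys (by omega)]
            congr 1
            omega

-- PySem's splitOn with a single-char separator is Mathlib's List.splitOn
lemma splitOn_go_eq (d : Char) : ∀ (fuel : Nat) (l cur : List Char) (acc : List (List Char)), l.length ≤ fuel →
    PySem.Chars.splitOn.go [d] fuel l cur acc
      = acc.reverse ++ (List.splitOn d l).modifyHead (cur.reverse ++ ·) := by
  intro fuel
  induction fuel with
  | zero =>
    intro l cur acc hle
    have hl : l = [] := by cases l <;> simp_all
    subst hl
    simp [PySem.Chars.splitOn.go, List.splitOn_nil]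
  | succ n ihn =>
    intro l cur acc hle
    cases l with
    | nil => simp [PySem.Chars.splitOn.go, List.splitOn_nil]
    | cons c rest =>
      rw [show PySem.Chars.splitOn.go [d] (n+1) (c :: rest) cur acc
            = if ([d] : List Char).isPrefixOf (c :: rest) then
                PySem.Chars.splitOn.go [d] n (List.drop 1 (c :: rest)) [] (cur.reverse :: acc)
              else PySem.Chars.splitOn.go [d] n rest (c :: cur) acc from rfl]
      have hsimp : List.splitOn d (c :: rest)
          = if c == d then [] :: List.splitOn d rest
            else (List.splitOn d rest).modifyHead (List.cons c) := by
        simp [List.splitOn, List.splitOnP_cons]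
      by_cases hdc : c = d
      · subst hdc
        have hpf : ([c] : List Char).isPrefixOf (c :: rest) = true := by simp [List.isPrefixOf]
        rw [if_pos hpf, ihn _ _ _ (by simpa using hle), hsimp]
        rcases hsp : List.splitOn c rest with _ | ⟨h, tl⟩
        · exact absurd hsp (by simp [List.splitOn, List.splitOnP_ne_nil])
        · simp [hsp]
      · have hpf : ([d] : List Char).isPrefixOf (c :: rest) = false := by
          simp [List.isPrefixOf]
          exact fun h => absurd h.symm hdc
        rw [if_neg (by simp [hpf]), ihn _ _ _ (by simpa using hle), hsimp]
        have hcd : (c == d) = false := by simp [hdc]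
        rw [if_neg (by simp [hcd])]
        rcases hsp : List.splitOn d rest with _ | ⟨h, tl⟩
        · exact absurd hsp (by simp [List.splitOn, List.splitOnP_ne_nil])
        · simp

lemma splitOn_eq (cs : List Char) (d : Char) :
    PySem.Chars.splitOn cs [d] = List.splitOn d cs := by
  unfold PySem.Chars.splitOn
  rw [splitOn_go_eq d (cs.length + 1) cs [] [] (by omega)]
  rcases hsp : List.splitOn d cs with _ | ⟨h, tl⟩
  · exact absurd hsp (by simp [List.splitOn, List.splitOnP_ne_nil])
  · simp

lemma splitOn_ne_nil (d : Char) (l : List Char) : List.splitOn d l ≠ [] := by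
  simp [List.splitOn, List.splitOnP_ne_nil]

lemma splitOn_pieces_free (d : Char) : ∀ (l : List Char), ∀ piece ∈ List.splitOn d l, d ∉ piece := by
  intro l
  induction l with
  | nil =>
    intro piece hp
    rw [List.splitOn_nil, List.mem_singleton] at hp
    subst hp
    simp
  | cons c rest ih =>
    intro piece hp
    have hsimp : List.splitOn d (c :: rest)
        = if c == d then [] :: List.splitOn d rest
          else (List.splitOn d rest).modifyHead (List.cons c) := by
      simp [List.splitOn, List.splitOnP_cons]
    by_cases hdc : c = d
    · subst hdc
      rw [hsimp, if_pos (by simp)] at hp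
      rcases List.mem_cons.mp hp with h1 | h1
      · subst h1; simp
      · exact ih piece h1
    · rw [hsimp, if_neg (by simp [hdc])] at hp
      rcases hsp : List.splitOn d rest with _ | ⟨h, tl⟩
      · exact absurd hsp (splitOn_ne_nil d rest)
      · rw [hsp, List.modifyHead_cons] at hp
        rcases List.mem_cons.mp hp with h1 | h1
        · subst h1
          intro hm
          rcases List.mem_cons.mp hm with h2 | h2
          · exact hdc h2.symm
          · exact ih h (hsp ▸ List.mem_cons_self ..) h2
        · exact ih piece (hsp ▸ List.mem_cons_of_mem _ h1)

lemma joinStr_eq (rest : List String) :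
    PySem.Str.join "." rest = String.ofList (PySem.Chars.join ['.'] (rest.map String.toList)) := by
  rw [← String.ofList_toList (s := PySem.Str.join "." rest)]
  rw [PySem.Str.toList_join]
  rfl

lemma scanA_go (parts : List String) : ∀ (l : List String) (k : Nat),
    parts.drop k = l →
    formatSuppressionsScanA parts (PySem.List.enumerate l (k : Int))
      = (cScan (l.map String.toList)).map String.ofList := by
  intro l
  induction l with
  | nil => intro k _; rfl
  | cons s rest ihl =>
    intro k hk
    have hen : PySem.List.enumerate (s :: rest) (k : Int)
        = ((k : Int), s) :: PySem.List.enumerate rest ((k : Int) + 1) := rfl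
    rw [hen]
    have hisin : PySem.Str.isIn "typespec-" s = PySem.Chars.isIn tySub s.toList := rfl
    show (if PySem.Str.isIn "typespec-" s && decide ((k : Int) + 1 < (parts.length : Int)) then
        some (PySem.Str.join "." (PySem.List.slice parts (some ((k : Int) + 1)) none))
      else formatSuppressionsScanA parts (PySem.List.enumerate rest ((k : Int) + 1))) = _
    rcases rest with _ | ⟨y, t⟩
    · -- s is the last part: condition's second conjunct is false
      have hlen : parts.length = k + 1 := by
        have h1 := congrArg List.length hk
        simp at h1
        omega
      have hcond : decide ((k : Int) + 1 < (parts.length : Int)) = false := by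
        simp; omega
      rw [hcond]
      simp only [Bool.and_false, Bool.false_eq_true, if_false]
      show formatSuppressionsScanA parts [] = _
      simp [formatSuppressionsScanA, cScan]
    · have hlen : k + 2 ≤ parts.length := by
        have h1 := congrArg List.length hk
        simp at h1
        omega
      have hcond : decide ((k : Int) + 1 < (parts.length : Int)) = true := by
        simp; omega
      rw [hcond]
      by_cases hin : PySem.Chars.isIn tySub s.toList = true
      · rw [hisin]
        simp only [hin, Bool.true_and, if_true]
        have hsl : PySem.List.slice parts (some ((k : Int) + 1)) none = y :: t := by
          have hcast : ((k : Int) + 1) = ((k + 1 : Nat) : Int) := by push_cast; ring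
          rw [hcast, PySem.List.slice_from_natCast]
          rw [← List.drop_drop, hk]
          rfl
        rw [hsl]
        have hscan : cScan ((s :: y :: t).map String.toList)
            = some (PySem.Chars.join ['.'] ((y :: t).map String.toList)) := by
          simp [cScan, hin]
        rw [hscan, joinStr_eq]
        rfl
      · rw [hisin]
        simp only [hin, Bool.false_and, if_false, Bool.false_eq_true]
        have hrec := ihl (k + 1) (by rw [← List.drop_drop, hk]; rfl)
        have hcast : ((k : Int) + 1) = ((k + 1 : Nat) : Int) := by push_cast; ring
        rw [hcast, hrec]
        have hscan : cScan ((s :: y :: t).map String.toList) = cScan ((y :: t).map String.toList) := by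
          simp [cScan, hin]
        rw [hscan]

lemma scanA_eq_cScan (parts : List String) :
    formatSuppressionsScanA parts (PySem.List.enumerate parts)
      = (cScan (parts.map String.toList)).map String.ofList :=
  scanA_go parts parts 0 (by simp)

lemma extractB_chars (s : String) : extractB s = (cExtractB s.toList).map String.ofList := by
  unfold extractB cExtractB
  have hfind : PySem.Str.find s "typespec-" = PySem.Chars.find s.toList tySub := rfl
  rw [hfind]
  simp only [ne_eq]
  by_cases hp : PySem.Chars.find s.toList tySub = -1
  · simp [hp]
  · have hp0 : 0 ≤ PySem.Chars.find s.toList tySub := by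
      have := PySem.Chars.neg_one_le_find s.toList tySub
      omega
    have hple : (PySem.Chars.find s.toList tySub).toNat ≤ s.toList.length := by
      have := PySem.Chars.find_le_length s.toList tySub
      omega
    have hcast : PySem.Chars.find s.toList tySub = (((PySem.Chars.find s.toList tySub).toNat : Nat) : Int) := by
      omega
    have hff : PySem.Str.findFrom s "." (PySem.Chars.find s.toList tySub)
        = PySem.Chars.findFrom s.toList ['.'] (PySem.Chars.find s.toList tySub) none := by
      rw [PySem.Str.findFrom_eq]; rfl
    have hd : PySem.Str.findFrom s "." (PySem.Chars.find s.toList tySub)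
        = (if PySem.Chars.find (List.drop (PySem.Chars.find s.toList tySub).toNat s.toList) ['.'] = -1 then -1
           else PySem.Chars.find s.toList tySub
              + PySem.Chars.find (List.drop (PySem.Chars.find s.toList tySub).toNat s.toList) ['.']) := by
      rw [hff, hcast, PySem.Chars.findFrom_natCast s.toList ['.'] _ hple, ← hcast]
    rw [hd]
    by_cases hr : PySem.Chars.find (List.drop (PySem.Chars.find s.toList tySub).toNat s.toList) ['.'] = -1
    · rw [if_pos hr]
      simp [hp, hr]
    · rw [if_neg hr]
      have hr0 : 0 ≤ PySem.Chars.find (List.drop (PySem.Chars.find s.toList tySub).toNat s.toList) ['.'] := by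
        have := PySem.Chars.neg_one_le_find (List.drop (PySem.Chars.find s.toList tySub).toNat s.toList) ['.']
        omega
      rw [if_pos hp, if_pos (show ¬ (PySem.Chars.find s.toList tySub
        + PySem.Chars.find (List.drop (PySem.Chars.find s.toList tySub).toNat s.toList) ['.']) = -1 by omega)]
      rw [if_neg hp, if_neg hr]
      simp only [Option.map_some]
      congr 1
      rw [← String.ofList_toList (s := PySem.Str.slice s _ none)]
      congr 1
      rw [PySem.Str.toList_slice,
        PySem.Chars.slice_eq_listSlice,
        show PySem.Chars.find s.toList tySub
            + PySem.Chars.find (List.drop (PySem.Chars.find s.toList tySub).toNat s.toList) ['.'] + 1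
          = (((PySem.Chars.find s.toList tySub).toNat
              + (PySem.Chars.find (List.drop (PySem.Chars.find s.toList tySub).toNat s.toList) ['.']).toNat + 1 : Nat) : Int)
          by omega,
        PySem.List.slice_from_natCast]

lemma extractA_eq_extractB (s : String) : extractA s = extractB s := by
  unfold extractA
  have hparts : (PySem.Str.split? s ".").getD []
      = (List.splitOn '.' s.toList).map String.ofList := by
    show ((PySem.Chars.split? s.toList ['.']).map (List.map String.ofList)).getD [] = _
    simp [PySem.Chars.split?, splitOn_eq]
  rw [hparts, scanA_eq_cScan]
  have hmm : ((List.splitOn '.' s.toList).map String.ofList).map String.toList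
      = List.splitOn '.' s.toList := by
    simp [List.map_map, Function.comp_def, String.toList_ofList]
  rw [hmm]
  have hmain := main_chars (List.splitOn '.' s.toList) (splitOn_ne_nil '.' s.toList)
    (fun x hx hm => splitOn_pieces_free '.' s.toList x hx hm)
  have hjoin : PySem.Chars.join ['.'] (List.splitOn '.' s.toList) = s.toList := by
    show (['.'] : List Char).intercalate (List.splitOn '.' s.toList) = s.toList
    exact List.intercalate_splitOn s.toList '.'
  rw [hjoin] at hmain
  rw [← hmain, extractB_chars]

lemma loopB_wild : ∀ (l : List String) (props : List String),
    (∃ s ∈ l, PySem.Str.endswith s ".*" = true) → formatSuppressionsLoopB l props = "ALL" := by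
  intro l
  induction l with
  | nil => intro props h; simp at h
  | cons s rest ih =>
    intro props h
    cases hE : PySem.Str.endswith s ".*" with
    | true =>
      simp only [formatSuppressionsLoopB, hE]
      rw [if_pos trivial]
    | false =>
      obtain ⟨w, hw1, hw2⟩ := h
      rcases List.mem_cons.mp hw1 with h1 | h1
      · subst h1; rw [hE] at hw2; cases hw2
      · simp only [formatSuppressionsLoopB, hE, Bool.false_eq_true, if_false]
        split_ifs <;> exact ih _ ⟨w, h1, hw2⟩

lemma loopB_no_wild : ∀ (l : List String) (props : List String),
    (∀ s ∈ l, PySem.Str.endswith s ".*" = false) →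
    formatSuppressionsLoopB l props =
      (if !(props ++ l.filterMap extractB).isEmpty then
        PySem.Str.join ", " (PySem.List.sorted (props ++ l.filterMap extractB) (fun x => x) false)
      else "Unknown") := by
  intro l
  induction l with
  | nil => intro props h; simp [formatSuppressionsLoopB]
  | cons s rest ih =>
    intro props h
    have hE : PySem.Str.endswith s ".*" = false := h s (List.mem_cons_self ..)
    have hrest : ∀ z ∈ rest, PySem.Str.endswith z ".*" = false :=
      fun z hz => h z (List.mem_cons_of_mem _ hz)
    simp only [formatSuppressionsLoopB, hE, Bool.false_eq_true, if_false, ne_eq]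
    rw [List.filterMap_cons]
    by_cases h1 : PySem.Str.find s "typespec-" = -1
    · have hx : extractB s = none := by
        unfold extractB
        simp only [ne_eq]
        rw [if_neg (not_not_intro h1)]
      rw [hx, if_neg (not_not_intro h1), ih _ hrest]
    · by_cases h2 : PySem.Str.findFrom s "." (PySem.Str.find s "typespec-") = -1
      · have hx : extractB s = none := by
          unfold extractB
          simp only [ne_eq]
          rw [if_pos h1, if_neg (not_not_intro h2)]
        rw [hx, if_pos h1, if_neg (not_not_intro h2), ih _ hrest]
      · have hx : extractB s
            = some (PySem.Str.slice s (some (PySem.Str.findFrom s "." (PySem.Str.find s "typespec-") + 1)) none) := by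
          unfold extractB
          simp only [ne_eq]
          rw [if_pos h1, if_pos h2]
        rw [hx, if_pos h1, if_pos h2, ih _ hrest]
        simp [List.append_assoc]

lemma foldA_eq (l : List String) (acc : List String) :
    l.foldl (fun props s =>
        let parts := (PySem.Str.split? s ".").getD []
        match formatSuppressionsScanA parts (PySem.List.enumerate parts) with
        | some prop => props ++ [prop]
        | none => props) acc = acc ++ l.filterMap extractA := by
  induction l generalizing acc with
  | nil => simp
  | cons s rest ih =>
    rw [List.foldl_cons]
    show List.foldl _ (match extractA s with
        | some prop => acc ++ [prop]
        | none => acc) rest = acc ++ List.filterMap extractA (s :: rest)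
    rw [List.filterMap_cons]
    cases hx : extractA s with
    | none => rw [hx] at *; rw [ih]
    | some v =>
      rw [hx] at *
      rw [ih]
      simp [List.append_assoc]

-- ===== VERDICT (by name: the statement is the Claim_ definition above) =====
theorem format_suppressions_spec : Claim_equal_format_suppressions := by
  intro l _
  unfold Spec_format_suppressions format_suppressions format_suppressions_alt
  by_cases hemp : l.isEmpty
  · simp [hemp]
  · simp only [hemp, Bool.false_eq_true, if_false]
    by_cases hw : ∃ s ∈ l, PySem.Str.endswith s ".*" = true
    · have hfil : (!(l.filter (fun s => PySem.Str.endswith s ".*")).isEmpty) = true := by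
        obtain ⟨s, hs1, hs2⟩ := hw
        simp only [Bool.not_eq_true', List.isEmpty_eq_false_iff, ne_eq, List.filter_eq_nil_iff]
        intro hall
        exact absurd hs2 (by simpa using hall s hs1)
      rw [loopB_wild l [] hw]
      simp only [hfil, if_true]
    · have hw' : ∀ s ∈ l, PySem.Str.endswith s ".*" = false := by
        intro s hs
        cases hE : PySem.Str.endswith s ".*" with
        | false => rfl
        | true => exact absurd ⟨s, hs, hE⟩ hw
      have hfil : (!(l.filter (fun s => PySem.Str.endswith s ".*")).isEmpty) = false := by
        simp only [Bool.not_eq_false', List.isEmpty_iff, List.filter_eq_nil_iff]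
        intro s hs
        simpa using hw' s hs
      rw [loopB_no_wild l [] hw', foldA_eq l []]
      simp only [hfil, Bool.false_eq_true, if_false, List.nil_append]
      rw [List.filterMap_congr (fun x _ => extractA_eq_extractB x)]
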